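-- pv_equiv track=rewrite | github.com/asdhamidi/6.0001 | PS2/hangman.py | match_with_gaps
-- ===== SOURCE A (Python) =====
-- def match_with_gaps(my_word, other_word):
--   #Second part checks if each of the guessed letter matches the word's letter or not.
--   c = 0
--   i = 0
--   while c < len(my_word):
--     if my_word[c] == '_':
--       c += 2
--       i += 1
--       continue
--     if other_word[i] != my_word[c]:
--       return False
--     c += 1
--     i += 1
--
--   return True
-- ===== SOURCE B (Python) =====
-- def match_with_gaps(my_word, other_word):
--     # Pass 1: extract the slot characters of my_word (on '_' skip the following char too).
--     slots = []
--     c = 0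
--     n = len(my_word)
--     while c < n:
--         ch = my_word[c]
--         if ch == '_':
--             slots.append('_')
--             c += 2
--         else:
--             slots.append(ch)
--             c += 1
--     # Pass 2: each non-'_' slot must equal other_word at the same slot index.
--     for i, ch in enumerate(slots):
--         if ch != '_' and other_word[i] != ch:
--             return False
--     return True
-- ===== Notes on version B (the rewrite author's own statement) =====
-- stated objective: alternative
-- what changed: Replaces A's single two-cursor while loop by two passes: first extract the list of slot characters of my_word (stride 2 on '_', 1 otherwise), then compare each non-'_' slot against other_word at its slot index; trades an intermediate slot list for the fused loop.
import Mathlib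
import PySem

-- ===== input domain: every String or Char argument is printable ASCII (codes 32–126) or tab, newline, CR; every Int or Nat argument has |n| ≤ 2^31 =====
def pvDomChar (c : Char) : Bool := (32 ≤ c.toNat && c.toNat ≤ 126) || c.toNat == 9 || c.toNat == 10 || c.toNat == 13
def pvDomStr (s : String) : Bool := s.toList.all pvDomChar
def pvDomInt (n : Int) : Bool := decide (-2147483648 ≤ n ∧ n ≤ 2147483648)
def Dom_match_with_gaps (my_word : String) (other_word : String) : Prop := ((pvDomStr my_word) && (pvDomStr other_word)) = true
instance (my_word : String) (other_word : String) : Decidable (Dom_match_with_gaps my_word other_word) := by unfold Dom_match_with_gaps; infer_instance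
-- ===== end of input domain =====

-- B replaces A's single two-cursor while loop by two passes (extract slot list, then compare
-- by slot index); equivalence about the RETURN value on inputs where A returns (Pre_ below).

-- ===== PORT A =====
-- A's while loop: cursor c over my_word (dropping from the front models c += 1 / c += 2),
-- cursor i over other_word.  `others[i]?` is Python's other_word[i] for the nonnegative i
-- used here; `none` is Python's IndexError, excluded by Pre_ (the port returns false there).
def mwgLoopA (mys : List Char) (others : List Char) (i : Nat) : Bool :=
  match mys with
  | [] => true
  | ch :: rest =>
    if ch = '_' then
      -- c += 2; i += 1; continue  (skip the '_' and the character after it, if any)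
      match rest with
      | [] => mwgLoopA [] others (i + 1)
      | _ :: rest2 => mwgLoopA rest2 others (i + 1)
    else
      match others[i]? with
      | some oc => if oc ≠ ch then false else mwgLoopA rest others (i + 1)
      | none => false                               -- IndexError in Python

def match_with_gaps (my_word : String) (other_word : String) : Bool :=
  mwgLoopA my_word.toList other_word.toList 0

-- ===== PORT B =====
-- Pass 1 of Source B: the list of slot characters (on '_' also skip the following char).
def mwgSlots (mys : List Char) : List Char :=
  match mys with
  | [] => []
  | ch :: rest =>
    if ch = '_' then
      -- on '_' also skip the following character (c += 2), if any
      match rest with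
      | [] => ['_']
      | _ :: rest2 => '_' :: mwgSlots rest2
    else ch :: mwgSlots rest

-- Pass 2 of Source B: `for i, ch in enumerate(slots)` with the short-circuit test
-- `ch != '_' and other_word[i] != ch`; `none` is Python's IndexError (excluded by Pre_).
def mwgCheckB (others : List Char) (slots : List Char) (i : Nat) : Bool :=
  match slots with
  | [] => true
  | ch :: rest =>
    if ch = '_' then mwgCheckB others rest (i + 1)
    else
      match others[i]? with
      | some oc => if oc ≠ ch then false else mwgCheckB others rest (i + 1)
      | none => false

def match_with_gaps_alt (my_word : String) (other_word : String) : Bool :=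
  mwgCheckB other_word.toList (mwgSlots my_word.toList) 0

-- ===== PRECONDITION & SPEC =====
-- Pre_ excludes exactly the inputs where Python A raises IndexError (B raises there too):
-- some non-'_' slot index is ≥ len(other_word) while every in-range non-'_' slot matches.
-- (mwgSlots here only describes the gap LAYOUT of my_word — which characters occupy slots —
-- not a run of either port; the condition is over that shape plus other_word's length/letters.)
def Pre_match_with_gaps (my_word : String) (other_word : String) : Prop :=
  ¬ (((mwgSlots my_word.toList).zipIdx.any fun p =>
        p.1 ≠ '_' && other_word.toList.length ≤ p.2) = true ∧
     ((mwgSlots my_word.toList).zipIdx.all fun p =>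
        p.1 = '_' || other_word.toList.length ≤ p.2 || other_word.toList.getD p.2 ' ' = p.1) = true)
instance (my_word : String) (other_word : String) : Decidable (Pre_match_with_gaps my_word other_word) := by unfold Pre_match_with_gaps; infer_instance

def pvWitness_match_with_gaps : String × String := ("a_ c", "axc")

def Spec_match_with_gaps (my_word : String) (other_word : String) (out : Bool) : Prop := out = match_with_gaps_alt my_word other_word
instance (my_word : String) (other_word : String) (out : Bool) : Decidable (Spec_match_with_gaps my_word other_word out) := by unfold Spec_match_with_gaps; infer_instance

-- ===== CLAIM (what is proved, stated in full; the proofs are below) =====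
def Claim_equal_match_with_gaps : Prop := ∀ (my_word : String) (other_word : String), Dom_match_with_gaps my_word other_word → Pre_match_with_gaps my_word other_word → Spec_match_with_gaps my_word other_word (match_with_gaps my_word other_word)

-- ===== LEMMAS AND PROOFS =====
-- Fusion: checking B's slot list is step-for-step A's loop (the two ports agree as total
-- Lean functions; Pre_ only delimits where this equality reflects Python, both raising outside).
theorem mwgSlots_cons_ne (ch : Char) (rest : List Char) (h : ¬ ch = '_') :
    mwgSlots (ch :: rest) = ch :: mwgSlots rest := by
  rw [mwgSlots.eq_def]; simp [h]

theorem mwg_fuse (mys others : List Char) (i : Nat) :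
    mwgLoopA mys others i = mwgCheckB others (mwgSlots mys) i := by
  fun_induction mwgLoopA mys others i <;>
    simp_all [mwgSlots, mwgCheckB, mwgSlots_cons_ne]

-- ===== VERDICT (by name: the statement is the Claim_ definition above) =====
theorem match_with_gaps_spec : Claim_equal_match_with_gaps := by
  intro my_word other_word _ _
  unfold Spec_match_with_gaps match_with_gaps match_with_gaps_alt
  exact mwg_fuse _ _ _
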